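-- pv_equiv track=rewrite | github.com/LGKAI/ProgrammingForAI | Practice/Lab2_Function-List/Lab2.py | ex11
-- ===== SOURCE A (Python) =====
-- def ex11(a, k):
--     from collections import Counter
--     count = Counter(a)
--     for num in list(count.keys()):
--         complement = k - num
--         if num == complement:
--             if count[num] % 2 != 0:
--                 return False
--         else:
--             if count[num] > count[complement]:
--                 return False
--             count[complement] -= count[num]
--             count[num] = 0
--     return True
-- ===== SOURCE B (Python) =====
-- def ex11(a, k):
--     s = sorted(a)
--     n = len(s)
--     if n % 2 != 0:
--         return False
--     for i in range(n // 2):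
--         if s[i] + s[n - 1 - i] != k:
--             return False
--     return True
-- ===== Notes on version B (the rewrite author's own statement) =====
-- stated objective: alternative
-- what changed: Replaced the Counter-based destructive complement-matching (mutating counts with early returns) by sorting a copy of the list and checking that opposite ends pair to k (s[i]+s[n-1-i]==k for i<n//2), rejecting odd lengths first.
import Mathlib
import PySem

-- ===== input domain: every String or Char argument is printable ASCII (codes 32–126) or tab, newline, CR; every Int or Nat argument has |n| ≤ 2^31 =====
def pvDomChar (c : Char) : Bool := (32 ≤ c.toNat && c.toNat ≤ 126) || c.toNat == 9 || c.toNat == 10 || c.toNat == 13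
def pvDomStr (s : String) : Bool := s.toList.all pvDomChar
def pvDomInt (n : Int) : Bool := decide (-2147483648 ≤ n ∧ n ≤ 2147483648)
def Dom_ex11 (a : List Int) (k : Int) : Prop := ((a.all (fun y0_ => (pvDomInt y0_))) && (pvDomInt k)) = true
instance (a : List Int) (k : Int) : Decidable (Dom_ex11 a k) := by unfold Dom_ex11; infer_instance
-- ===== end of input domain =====

-- B replaces A's destructive Counter complement-matching by sorting the list and checking
-- that opposite ends of the sorted copy pair to k (objective: alternative algorithm).

-- ===== PORT A =====
-- the for-loop over list(count.keys()) with its mutating dict state and early returns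
def ex11Loop (k : Int) (ks : List Int) (d : PySem.Dict Int Int) : Bool :=
  match ks with
  | [] => true
  | num :: rest =>
    let complement := k - num
    if num = complement then
      if PySem.Int.mod (d.getD num 0) 2 ≠ 0 then false
      else ex11Loop k rest d
    else
      if d.getD num 0 > d.getD complement 0 then false
      else
        -- count[complement] -= count[num]; count[num] = 0  (Counter reads a missing key as 0; assignment inserts)
        ex11Loop k rest ((d.insert complement (d.getD complement 0 - d.getD num 0)).insert num 0)

def ex11 (a : List Int) (k : Int) : Bool :=
  let count := PySem.Dict.counter a
  ex11Loop k count.keys count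

-- ===== PORT B =====
def ex11_alt (a : List Int) (k : Int) : Bool :=
  let s := PySem.List.sorted a (fun x => x) false
  let n := s.length
  if n % 2 ≠ 0 then false
  else
    -- for i in range(n // 2): both indices satisfy 0 ≤ i < n, so getD is exact for s[i], s[n-1-i]
    (List.range (n / 2)).all (fun i => decide (s.getD i 0 + s.getD (n - 1 - i) 0 = k))

-- ===== PRECONDITION & SPEC =====
def Spec_ex11 (a : List Int) (k : Int) (out : Bool) : Prop := out = ex11_alt a k
instance (a : List Int) (k : Int) (out : Bool) : Decidable (Spec_ex11 a k out) := by unfold Spec_ex11; infer_instance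

-- ===== CLAIM (what is proved, stated in full; the proofs are below) =====
def Claim_equal_ex11 : Prop := ∀ (a : List Int) (k : Int), Dom_ex11 a k → Spec_ex11 a k (ex11 a k)

-- ===== LEMMAS AND PROOFS =====

def goodAt (a : List Int) (k x : Int) : Prop :=
  if x + x = k then a.count x % 2 = 0 else a.count x = a.count (k - x)
def Good (a : List Int) (k : Int) : Prop := ∀ x ∈ a, goodAt a k x

def dval (a : List Int) (k : Int) (ps : List Int) (x : Int) : Int :=
  if x + x = k then (a.count x : Int)
  else if x ∈ ps then 0
  else if k - x ∈ ps then (a.count x : Int) - (a.count (k - x) : Int)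
  else (a.count x : Int)

def Hps (a : List Int) (k : Int) (ps : List Int) : Prop :=
  ∀ x ∈ ps, (x + x = k → a.count x % 2 = 0) ∧
    (x + x ≠ k → (k - x ∈ ps → a.count x = a.count (k - x)) ∧ (k - x ∉ ps → a.count x ≤ a.count (k - x)))

theorem loopA_iff (a : List Int) (k : Int) :
    ∀ (ks ps : List Int) (d : PySem.Dict Int Int),
      PySem.Set.ofList a = ps.reverse ++ ks →
      (∀ x, d.getD x 0 = dval a k ps x) →
      Hps a k ps →
      (ex11Loop k ks d = true ↔ Good a k) := by
  intro ks
  induction ks with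
  | nil =>
    intro ps d hkeys hd hps
    simp only [ex11Loop]
    constructor
    · intro _ x hx
      have hxp : x ∈ ps := by
        have h1 : x ∈ PySem.Set.ofList a := (PySem.Set.mem_ofList _ _).mpr hx
        rw [hkeys] at h1
        simpa using h1
      have hx1 := hps x hxp
      unfold goodAt
      split
      · exact hx1.1 (by assumption)
      · rename_i hne
        have h2 := hx1.2 hne
        by_cases hkx : k - x ∈ ps
        · exact h2.1 hkx
        · exfalso
          have hle := h2.2 hkx
          have hpos : 0 < a.count x := List.count_pos_iff.mpr hx
          have : k - x ∈ a := List.count_pos_iff.mp (by omega)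
          have : k - x ∈ PySem.Set.ofList a := (PySem.Set.mem_ofList _ _).mpr this
          rw [hkeys] at this
          simp at this
          exact hkx this
    · intro _; trivial
  | cons num rest ih =>
    intro ps d hkeys hd hps
    have hnodup : (ps.reverse ++ num :: rest).Nodup := by
      rw [← hkeys]; exact PySem.Set.nodup_ofList a
    have hnum_a : num ∈ a := by
      have : num ∈ PySem.Set.ofList a := by rw [hkeys]; simp
      exact (PySem.Set.mem_ofList _ _).mp this
    have hnum_ps : num ∉ ps := by
      rw [List.nodup_append] at hnodup
      intro hmem
      exact hnodup.2.2 num (List.mem_reverse.mpr hmem) num (by simp) rfl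
    simp only [ex11Loop]
    by_cases hcmp : num = k - num
    · rw [if_pos hcmp]
      have hknum : num + num = k := by omega
      have hdn : d.getD num 0 = (a.count num : Int) := by
        rw [hd]; unfold dval; rw [if_pos hknum]
      have hmodcast : PySem.Int.mod (d.getD num 0) 2 = ((a.count num % 2 : Nat) : Int) := by
        rw [hdn]; exact_mod_cast PySem.Int.mod_natCast (a.count num) 2
      by_cases hodd : a.count num % 2 = 0
      · rw [if_neg (by rw [hmodcast]; simp [hodd])]
        apply ih (num :: ps) d
        · rw [hkeys]; simp
        · intro x
          rw [hd]; unfold dval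
          by_cases h1 : x + x = k
          · simp [h1]
          · have hxne : x ≠ num := by omega
            have hkne : k - x ≠ num := by omega
            simp [h1, List.mem_cons, hxne, hkne]
        · intro x hx
          rcases List.mem_cons.mp hx with rfl | hxps
          · exact ⟨fun _ => hodd, fun hne => absurd hknum hne⟩
          · have hold := hps x hxps
            refine ⟨hold.1, fun hne => ?_⟩
            have hkne : k - x ≠ num := by omega
            have h2 := hold.2 hne
            constructor
            · intro hmem
              exact h2.1 (by rcases List.mem_cons.mp hmem with h | h; exact absurd h hkne; exact h)
            · intro hno
              exact h2.2 (fun hc => hno (List.mem_cons_of_mem _ hc))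
      · rw [if_pos (by rw [hmodcast]; omega)]
        apply iff_of_false (by simp)
        intro hg
        have := hg num hnum_a
        unfold goodAt at this
        rw [if_pos hknum] at this
        exact hodd this
    · rw [if_neg hcmp]
      have hknum : num + num ≠ k := by omega
      have hkk : k - (k - num) = num := by omega
      have hkcmp : (k - num) + (k - num) ≠ k := by omega
      by_cases hin : k - num ∈ ps
      · have hdn : d.getD num 0 = (a.count num : Int) - (a.count (k - num) : Int) := by
          rw [hd]; unfold dval
          rw [if_neg hknum, if_neg (by simpa using hnum_ps), if_pos hin]
        have hdc : d.getD (k - num) 0 = 0 := by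
          rw [hd]; unfold dval
          rw [if_neg hkcmp, if_pos hin]
        have hle : a.count (k - num) ≤ a.count num := by
          have h2 := (hps _ hin).2 hkcmp
          have := h2.2 (by rw [hkk]; exact hnum_ps)
          rwa [hkk] at this
        by_cases heq2 : a.count num = a.count (k - num)
        · rw [if_neg (by rw [hdn, hdc]; omega)]
          apply ih (num :: ps)
          · rw [hkeys]; simp
          · intro x
            rw [PySem.Dict.getD_insert, PySem.Dict.getD_insert]
            by_cases hx1 : x = num
            · subst hx1
              rw [if_pos rfl]
              unfold dval
              rw [if_neg hknum, if_pos (by simp)]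
            · rw [if_neg hx1]
              by_cases hx2 : x = k - num
              · subst hx2
                rw [if_pos rfl, hdn, hdc]
                unfold dval
                rw [if_neg hkcmp, if_pos (List.mem_cons_of_mem _ hin)]
                omega
              · rw [if_neg hx2, hd]
                unfold dval
                by_cases h1 : x + x = k
                · simp [h1]
                · have hkxne : k - x ≠ num := by omega
                  simp [h1, List.mem_cons, hx1, hkxne]
          · intro x hx
            rcases List.mem_cons.mp hx with rfl | hxps
            · exact ⟨fun h => absurd h hknum,
                fun _ => ⟨fun _ => heq2, fun hno => absurd (List.mem_cons_of_mem _ hin) hno⟩⟩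
            · have hold := hps x hxps
              refine ⟨hold.1, fun hne => ?_⟩
              have h2 := hold.2 hne
              by_cases hkx : k - x = num
              · have hxval : x = k - num := by omega
                constructor
                · intro _
                  rw [hxval, hkk]; exact heq2.symm
                · intro hno; exact absurd (by rw [hkx]; simp) hno
              · constructor
                · intro hmem
                  exact h2.1 (by rcases List.mem_cons.mp hmem with h | h; exact absurd h hkx; exact h)
                · intro hno
                  exact h2.2 (fun hc => hno (List.mem_cons_of_mem _ hc))
        · rw [if_pos (by rw [hdn, hdc]; omega)]
          apply iff_of_false (by simp)
          intro hg
          have := hg num hnum_a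
          unfold goodAt at this
          rw [if_neg hknum] at this
          exact heq2 this
      · have hkps : k - num ∉ ps := hin
        have hdn : d.getD num 0 = (a.count num : Int) := by
          rw [hd]; unfold dval
          rw [if_neg hknum, if_neg (by simpa using hnum_ps), if_neg (by simpa using hin)]
        have hdc : d.getD (k - num) 0 = (a.count (k - num) : Int) := by
          rw [hd]; unfold dval
          rw [if_neg hkcmp, if_neg (by simpa using hin), if_neg (by rw [hkk]; simpa using hnum_ps)]
        by_cases hgt : a.count (k - num) < a.count num
        · rw [if_pos (by rw [hdn, hdc]; omega)]
          apply iff_of_false (by simp)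
          intro hg
          have := hg num hnum_a
          unfold goodAt at this
          rw [if_neg hknum] at this
          omega
        · rw [if_neg (by rw [hdn, hdc]; omega)]
          apply ih (num :: ps)
          · rw [hkeys]; simp
          · intro x
            rw [PySem.Dict.getD_insert, PySem.Dict.getD_insert]
            by_cases hx1 : x = num
            · subst hx1
              rw [if_pos rfl]
              unfold dval
              rw [if_neg hknum, if_pos (by simp)]
            · rw [if_neg hx1]
              by_cases hx2 : x = k - num
              · subst hx2
                rw [if_pos rfl, hdn, hdc]
                unfold dval
                rw [if_neg hkcmp,
                  if_neg (by
                    intro h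
                    rcases List.mem_cons.mp h with h | h
                    · exact hcmp (by omega)
                    · exact hin h),
                  if_pos (by rw [hkk]; simp)]
                rw [hkk]
              · rw [if_neg hx2, hd]
                unfold dval
                by_cases h1 : x + x = k
                · simp [h1]
                · have hkxne : k - x ≠ num := by omega
                  simp [h1, List.mem_cons, hx1, hkxne]
          · intro x hx
            rcases List.mem_cons.mp hx with rfl | hxps
            · refine ⟨fun h => absurd h hknum, fun _ => ?_⟩
              constructor
              · intro hmem
                rcases List.mem_cons.mp hmem with h | h
                · exact absurd h (by omega)
                · exact absurd h hin
              · intro _; omega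
            · have hold := hps x hxps
              refine ⟨hold.1, fun hne => ?_⟩
              have h2 := hold.2 hne
              by_cases hkx : k - x = num
              · have hxval : x = k - num := by omega
                exact absurd (hxval ▸ hxps) hin
              · constructor
                · intro hmem
                  exact h2.1 (by rcases List.mem_cons.mp hmem with h | h; exact absurd h hkx; exact h)
                · intro hno
                  exact h2.2 (fun hc => hno (List.mem_cons_of_mem _ hc))

theorem exA_iff (a : List Int) (k : Int) : ex11 a k = true ↔ Good a k := by
  unfold ex11
  simp only []
  rw [PySem.Dict.keys_counter]
  apply loopA_iff a k (PySem.Set.ofList a) [] (PySem.Dict.counter a)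
  · simp
  · intro x
    rw [PySem.Dict.getD_counter]
    unfold dval
    simp
  · intro x hx
    simp at hx

theorem f_inj (k : Int) : Function.Injective (fun x : Int => k - x) := by
  intro x y h; dsimp only at h; omega

theorem count_ext (a : List Int) (k : Int) (h : Good a k) : ∀ x, a.count x = a.count (k - x) := by
  intro x
  by_cases hx : x ∈ a
  · have := h x hx
    unfold goodAt at this
    split at this
    · have : k - x = x := by omega
      rw [this]
    · exact this
  · have h0 : a.count x = 0 := List.count_eq_zero.mpr hx
    by_cases hy : k - x ∈ a
    · have hg := h _ hy
      unfold goodAt at hg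
      split at hg
      · exfalso; have : k - x = x := by omega
        rw [this] at hy; exact hx hy
      · have : k - (k - x) = x := by omega
        rw [this] at hg; omega
    · rw [h0, List.count_eq_zero.mpr hy]

theorem perm_map (a : List Int) (k : Int) (hc : ∀ x, a.count x = a.count (k - x)) :
    (a.map (fun x => k - x)).Perm a := by
  rw [List.perm_iff_count]
  intro x
  have h1 := List.count_map_of_injective a (fun y : Int => k - y) (f_inj k) (k - x)
  have h2 : k - (k - x) = x := by omega
  rw [h2] at h1
  rw [h1, ← hc x]

theorem sym_eq (a : List Int) (k : Int) (hc : ∀ x, a.count x = a.count (k - x)) :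
    PySem.List.sorted a (fun x => x) false
      = ((PySem.List.sorted a (fun x => x) false).map (fun x => k - x)).reverse := by
  set s := PySem.List.sorted a (fun x => x) false with hs
  apply PySem.List.sorted_id_eq_of_perm_of_pairwise
  · exact ((List.reverse_perm _).trans
      (((PySem.List.sorted_perm a (fun x => x) false).map _).trans (perm_map a k hc)))
  · rw [List.pairwise_reverse, List.pairwise_map]
    have := PySem.List.sorted_pairwise a (fun x => x)
    exact this.imp (by intro x y h; simp at h ⊢; omega)

theorem count_symm_of_sym (a : List Int) (k : Int)
    (hs : PySem.List.sorted a (fun x => x) false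
      = ((PySem.List.sorted a (fun x => x) false).map (fun x => k - x)).reverse) :
    ∀ x, a.count x = a.count (k - x) := by
  set s := PySem.List.sorted a (fun x => x) false with hsdef
  intro x
  have hp : s.Perm a := PySem.List.sorted_perm a (fun x => x) false
  have h1 : a.count x = s.count x := (hp.count_eq x).symm
  have h2 : s.count x = (s.map (fun y => k - y)).count x := by
    conv_lhs => rw [hs]
    exact List.count_reverse
  have h3 := List.count_map_of_injective s (fun y : Int => k - y) (f_inj k) (k - x)
  have h4 : k - (k - x) = x := by omega
  rw [h4] at h3
  rw [h1, h2, h3, (hp.count_eq (k - x))]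

theorem tri (k : Int) (l : List Int) : l.length =
    l.countP (fun y => decide (y + y < k)) + l.countP (fun y => decide (y + y = k))
      + l.countP (fun y => decide (k < y + y)) := by
  induction l with
  | nil => simp
  | cons x t ih =>
    simp only [List.countP_cons, List.length_cons, ih]
    rcases lt_trichotomy (x + x) k with h | h | h
    · have h2 : ¬ (x + x = k) := by omega
      have h3 : ¬ (k < x + x) := by omega
      simp [h, h2, h3]; omega
    · simp [h]; omega
    · have h2 : ¬ (x + x < k) := by omega
      have h3 : ¬ (x + x = k) := by omega
      simp [h, h2, h3]; omega

theorem A1A2 (a : List Int) (k : Int) (hc : ∀ x, a.count x = a.count (k - x)) :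
    a.countP (fun y => decide (y + y < k)) = a.countP (fun y => decide (k < y + y)) := by
  have hperm := perm_map a k hc
  have h1 : a.countP (fun y => decide (y + y < k))
      = (a.map (fun x => k - x)).countP (fun y => decide (y + y < k)) :=
    (hperm.countP_eq _).symm
  rw [h1, List.countP_map]
  apply List.countP_congr
  intro x _
  simp only [Function.comp]
  constructor <;> (intro h; simp at h ⊢; omega)

theorem m_eq_count (a : List Int) (k x : Int) (hx : x + x = k) :
    a.countP (fun y => decide (y + y = k)) = a.count x := by
  unfold List.count
  apply List.countP_congr
  intro y _
  constructor <;> (intro h; simp at h ⊢; omega)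

theorem altP (a : List Int) (k : Int) :
    ex11_alt a k = true ↔ (a.length % 2 = 0 ∧
      ∀ i < a.length / 2,
        (PySem.List.sorted a (fun x => x) false).getD i 0
          + (PySem.List.sorted a (fun x => x) false).getD (a.length - 1 - i) 0 = k) := by
  unfold ex11_alt
  have hlen : (PySem.List.sorted a (fun x => x) false).length = a.length :=
    PySem.List.length_sorted a _ false
  simp only [hlen]
  by_cases h : a.length % 2 = 0
  · simp [h, List.all_eq_true, List.mem_range]
  · simp [h]

-- full symmetry of the sorted list from the half-range pairing
theorem sym_of_pairs (a : List Int) (k : Int) (hev : a.length % 2 = 0)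
    (hp : ∀ i < a.length / 2,
        (PySem.List.sorted a (fun x => x) false).getD i 0
          + (PySem.List.sorted a (fun x => x) false).getD (a.length - 1 - i) 0 = k) :
    PySem.List.sorted a (fun x => x) false
      = ((PySem.List.sorted a (fun x => x) false).map (fun x => k - x)).reverse := by
  set s := PySem.List.sorted a (fun x => x) false with hsdef
  have hlen : s.length = a.length := PySem.List.length_sorted a _ false
  have key : ∀ i, i < s.length → s.getD i 0 + s.getD (s.length - 1 - i) 0 = k := by
    intro i hi
    rcases Nat.lt_or_ge i (s.length / 2) with hc | hc
    · have h1 := hp i (by omega)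
      rwa [← hlen] at h1
    · have hj : s.length - 1 - i < s.length / 2 := by omega
      have h1 := hp (s.length - 1 - i) (by omega)
      rw [← hlen] at h1
      have he : s.length - 1 - (s.length - 1 - i) = i := by omega
      rw [he] at h1
      omega
  apply List.ext_getElem
  · simp
  · intro i h1 h2
    have hkey := key i h1
    have hlt : s.length - 1 - i < s.length := by omega
    rw [List.getD_eq_getElem s 0 h1, List.getD_eq_getElem s 0 hlt] at hkey
    have hms : (s.map (fun x => k - x)).length = s.length := by simp
    rw [List.getElem_reverse, List.getElem_map]
    have hix : (s.map fun x => k - x).length - 1 - i = s.length - 1 - i := by omega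
    simp only [hix]
    omega

theorem pairs_of_sym (a : List Int) (k : Int)
    (hs : PySem.List.sorted a (fun x => x) false
      = ((PySem.List.sorted a (fun x => x) false).map (fun x => k - x)).reverse) :
    ∀ i < a.length / 2,
      (PySem.List.sorted a (fun x => x) false).getD i 0
        + (PySem.List.sorted a (fun x => x) false).getD (a.length - 1 - i) 0 = k := by
  set s := PySem.List.sorted a (fun x => x) false with hsdef
  have hlen : s.length = a.length := PySem.List.length_sorted a _ false
  intro i hi
  have h1 : i < s.length := by omega
  have h2 : s.length - 1 - i < s.length := by omega
  have hms : (s.map (fun x => k - x)).length = s.length := by simp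
  set j := (s.map (fun x => k - x)).length - 1 - i with hjdef
  have hj1 : j < s.length := by omega
  have hstep : s[i] = k - s[j] := by
    have := congrArg (fun l => l.getD i 0) hs
    simp only [] at this
    rw [List.getD_eq_getElem s 0 h1] at this
    rw [List.getD_eq_getElem _ 0 (by simpa using h1)] at this
    rw [List.getElem_reverse, List.getElem_map] at this
    exact this
  rw [show a.length - 1 - i = j from by omega]
  rw [List.getD_eq_getElem s 0 h1, List.getD_eq_getElem s 0 hj1]
  omega

theorem mid_even (a : List Int) (k : Int) (hc : ∀ x, a.count x = a.count (k - x))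
    (hev : a.length % 2 = 0) : ∀ x, x + x = k → a.count x % 2 = 0 := by
  intro x hx
  have h1 := tri k a
  have h2 := A1A2 a k hc
  have h3 := m_eq_count a k x hx
  omega

theorem even_of_good (a : List Int) (k : Int) (h : Good a k) : a.length % 2 = 0 := by
  have hc := count_ext a k h
  have h1 := tri k a
  have h2 := A1A2 a k hc
  have hm : a.countP (fun y => decide (y + y = k)) % 2 = 0 := by
    by_cases hk : (2 : Int) ∣ k
    · obtain ⟨c, hc2⟩ := hk
      have hx : c + c = k := by omega
      rw [m_eq_count a k c hx]
      by_cases hmem : c ∈ a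
      · have := h c hmem
        unfold goodAt at this
        rw [if_pos hx] at this
        exact this
      · simp [List.count_eq_zero.mpr hmem]
    · have : a.countP (fun y => decide (y + y = k)) = 0 := by
        rw [List.countP_eq_zero]
        intro y _
        simp only [decide_eq_true_eq]
        omega
      simp [this]
  omega

theorem exB_iff (a : List Int) (k : Int) : ex11_alt a k = true ↔ Good a k := by
  rw [altP]
  constructor
  · rintro ⟨hev, hp⟩
    have hs := sym_of_pairs a k hev hp
    have hc := count_symm_of_sym a k hs
    intro x hx
    unfold goodAt
    split
    · exact mid_even a k hc hev x (by assumption)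
    · exact hc x
  · intro hg
    have hc := count_ext a k hg
    have hev := even_of_good a k hg
    exact ⟨hev, pairs_of_sym a k (sym_eq a k hc)⟩

-- ===== VERDICT (by name: the statement is the Claim_ definition above) =====
theorem ex11_spec : Claim_equal_ex11 := by
  unfold Claim_equal_ex11
  intro a k _
  unfold Spec_ex11
  have hA := exA_iff a k
  have hB := exB_iff a k
  cases hcA : ex11 a k <;> cases hcB : ex11_alt a k <;> simp_all
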